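-- pv_equiv track=rewrite | github.com/Everyheart/Stockanalysis1 | 函数.py | dealdata
-- ===== SOURCE A (Python) =====
-- def dealdata(X):
--     Result=[]
--     first=[]
--     for i in range(len(X)):
--         if X[i] in first:
--             continue
--         else :
--             first.append(X[i])
--             qiuhe=0
--             for s in range(i,len(X)):
--                 if X[s]==X[i]:
--                     qiuhe+=X[s]
--                 else:
--                     break
--             Result.append(qiuhe)
--     return Result
-- ===== SOURCE B (Python) =====
-- def dealdata(X):
--     result = []
--     seen = []
--     rest = X
--     while rest:
--         v = rest[0]
--         run = 0
--         for x in rest: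
--             if x != v:
--                 break
--             run += 1
--         if v not in seen:
--             seen.append(v)
--             result.append(v * run)
--         rest = rest[run:]
--     return result
-- ===== Notes on version B (the rewrite author's own statement) =====
-- stated objective: alternative
-- what changed: B makes a single pass over consecutive runs (measuring each run once and emitting value*run_length), instead of A's nested index loops that re-scan a run element by element from every first occurrence.
import Mathlib
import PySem

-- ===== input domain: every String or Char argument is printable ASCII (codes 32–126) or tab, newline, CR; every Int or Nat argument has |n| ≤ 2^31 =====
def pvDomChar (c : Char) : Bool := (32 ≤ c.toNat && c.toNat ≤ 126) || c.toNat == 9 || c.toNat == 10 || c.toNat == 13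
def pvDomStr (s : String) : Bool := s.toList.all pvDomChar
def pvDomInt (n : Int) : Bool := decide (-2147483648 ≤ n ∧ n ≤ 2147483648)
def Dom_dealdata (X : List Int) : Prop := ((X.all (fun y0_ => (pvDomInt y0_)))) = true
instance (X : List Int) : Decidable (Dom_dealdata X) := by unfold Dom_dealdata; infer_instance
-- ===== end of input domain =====

-- B is a single pass over consecutive runs (one scan per run, value * run length);
-- A's nested index loops are replaced by this decomposition; same results, no speed claim.

-- ===== PORT A =====
-- inner loop: for s in range(i, len(X)): if X[s]==v: qiuhe+=X[s] else break
-- (indices are always in range here, so X.getD s 0 is exact for Python's X[s])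
def dealdataInner (X : List Int) (v : Int) (s : Nat) : Int :=
  if _h : s < X.length then
    if X.getD s 0 = v then X.getD s 0 + dealdataInner X v (s + 1) else 0
  else 0
termination_by X.length - s

-- outer loop over i in range(len(X)) carrying first and Result
def dealdataOuter (X : List Int) (i : Nat) (first Result : List Int) : List Int :=
  if _h : i < X.length then
    let v := X.getD i 0
    if v ∈ first then dealdataOuter X (i + 1) first Result
    else dealdataOuter X (i + 1) (first ++ [v]) (Result ++ [dealdataInner X v i])
  else Result
termination_by X.length - i

def dealdata (X : List Int) : List Int := dealdataOuter X 0 [] []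

-- ===== PORT B =====
-- while rest: count the leading run of rest, emit v*run if v unseen, rest = rest[run:]
def dealdataGo : List Int → List Int → List Int
  | [], _ => []
  | v :: t, seen =>
    let run := (List.takeWhile (· == v) (v :: t)).length
    let rest := (v :: t).drop run
    if v ∈ seen then dealdataGo rest seen
    else v * (run : Int) :: dealdataGo rest (seen ++ [v])
termination_by l _ => l.length
decreasing_by
  all_goals
    simp only [List.takeWhile_cons, beq_self_eq_true, if_true, List.length_cons,
      List.drop_succ_cons, List.length_drop]
    omega

def dealdata_alt (X : List Int) : List Int := dealdataGo X []

-- ===== PRECONDITION & SPEC =====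
def Spec_dealdata (X : List Int) (out : List Int) : Prop := out = dealdata_alt X
instance (X : List Int) (out : List Int) : Decidable (Spec_dealdata X out) := by unfold Spec_dealdata; infer_instance

-- ===== CLAIM (what is proved, stated in full; the proofs are below) =====
def Claim_equal_dealdata : Prop := ∀ (X : List Int), Dom_dealdata X → Spec_dealdata X (dealdata X)

-- ===== LEMMAS AND PROOFS =====

-- drop-based abstraction of A's outer loop
def fA : List Int → List Int → List Int
  | [], _ => []
  | v :: t, first =>
    if v ∈ first then fA t first
    else (List.takeWhile (· == v) (v :: t)).sum :: fA t (first ++ [v])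

theorem dealdataInner_eq (X : List Int) (v : Int) (s : Nat) :
    dealdataInner X v s = ((X.drop s).takeWhile (· == v)).sum := by
  induction hn : X.length - s using Nat.strong_induction_on generalizing s with
  | _ n ih =>
    rw [dealdataInner]
    by_cases h : s < X.length
    · rw [List.drop_eq_getElem_cons h, List.takeWhile_cons]
      have hg : X.getD s 0 = X[s] := by simp [List.getD, List.getElem?_eq_getElem h]
      by_cases he : X[s] = v
      · simp only [h, dif_pos, hg, he, beq_self_eq_true, if_true, List.sum_cons]
        rw [ih (X.length - (s+1)) (by omega) (s+1) rfl]
      · simp [h, he]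
    · simp [h, List.drop_eq_nil_of_le (by omega : X.length ≤ s)]

theorem dealdataOuter_eq (X : List Int) (i : Nat) (first Result : List Int) :
    dealdataOuter X i first Result = Result ++ fA (X.drop i) first := by
  induction hn : X.length - i using Nat.strong_induction_on generalizing i first Result with
  | _ n ih =>
    rw [dealdataOuter]
    by_cases h : i < X.length
    · have hg : X.getD i 0 = X[i] := by simp [List.getD, List.getElem?_eq_getElem h]
      rw [List.drop_eq_getElem_cons h]
      simp only [h, dif_pos, hg, fA]
      by_cases hm : X[i] ∈ first
      · rw [if_pos hm, if_pos hm, ih (X.length - (i+1)) (by omega) (i+1) first Result rfl]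
      · rw [if_neg hm, if_neg hm, ih (X.length - (i+1)) (by omega) (i+1) (first ++ [X[i]])
          (Result ++ [dealdataInner X (X[i]) i]) rfl, dealdataInner_eq,
          List.drop_eq_getElem_cons h]
        simp
    · simp [h, List.drop_eq_nil_of_le (by omega : X.length ≤ i), fA]

theorem fA_skip (p l first : List Int) (hp : ∀ x ∈ p, x ∈ first) :
    fA (p ++ l) first = fA l first := by
  induction p with
  | nil => rfl
  | cons a p ih =>
    have ha : a ∈ first := hp a (by simp)
    simp only [List.cons_append, fA, if_pos ha]
    exact ih (fun x hx => hp x (by simp [hx]))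

theorem sum_const (l : List Int) (v : Int) (h : ∀ x ∈ l, x = v) :
    l.sum = v * (l.length : Int) := by
  induction l with
  | nil => simp
  | cons a t ih =>
    have := h a (by simp)
    simp only [List.sum_cons, List.length_cons, this,
      ih (fun x hx => h x (by simp [hx]))]
    push_cast; ring

theorem takeWhile_all_eq (t : List Int) (v : Int) :
    ∀ x ∈ t.takeWhile (· == v), x = v := by
  intro x hx
  have := List.mem_takeWhile_imp hx
  simpa using this

theorem fA_eq_go (l first : List Int) : fA l first = dealdataGo l first := by
  induction hn : l.length using Nat.strong_induction_on generalizing l first with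
  | _ n ih =>
    cases l with
    | nil => simp [fA, dealdataGo]
    | cons v t =>
      have hsplit : t = t.takeWhile (· == v) ++ t.dropWhile (· == v) :=
        (List.takeWhile_append_dropWhile).symm
      have hrun : (List.takeWhile (· == v) (v :: t)).length =
          (t.takeWhile (· == v)).length + 1 := by
        simp
      have hdrop : (v :: t).drop (List.takeWhile (· == v) (v :: t)).length =
          t.dropWhile (· == v) := by
        rw [hrun, List.drop_succ_cons]
        nth_rewrite 2 [hsplit]
        exact List.drop_left
      have hlen : (t.dropWhile (· == v)).length < n := by
        have := List.length_dropWhile_le (· == v) t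
        simp only [← hn, List.length_cons]; omega
      rw [dealdataGo]
      simp only [hdrop]
      by_cases hm : v ∈ first
      · rw [fA, if_pos hm, if_pos hm]
        conv_lhs => rw [hsplit]
        rw [fA_skip _ _ _ (fun x hx => by rw [takeWhile_all_eq t v x hx]; exact hm)]
        exact ih _ hlen _ _ rfl
      · rw [fA, if_neg hm, if_neg hm]
        congr 1
        · rw [sum_const _ v (takeWhile_all_eq (v :: t) v), hrun]
        · conv_lhs => rw [hsplit]
          rw [fA_skip _ _ _ (fun x hx => by rw [takeWhile_all_eq t v x hx]; simp)]
          exact ih _ hlen _ _ rfl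

-- ===== VERDICT (by name: the statement is the Claim_ definition above) =====
theorem dealdata_spec : Claim_equal_dealdata := by
  intro X _
  unfold Spec_dealdata dealdata dealdata_alt
  rw [dealdataOuter_eq, List.nil_append, List.drop_zero, fA_eq_go]
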